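-- pv_equiv track=rewrite | github.com/makwana8399/Personalized-AI-Knowledge-Digest-Platform | ai-knowledge-digest/app/digest/generator.py | expand_interests
-- ===== SOURCE A (Python) =====
-- CANONICAL_TOPICS = {
--     "ai": ["ai", "artificial intelligence", "llm", "llms", "chatgpt"],
--     "mlops": ["mlops", "devops", "cloud", "infrastructure"],
--     "startup": ["startup", "startups", "business", "founder", "saas"],
--     "product": ["product", "pm", "ux", "design"],
--     "vc": ["vc", "investment", "funding"],
--     "general": [],
-- }
--
-- def expand_interests(interests: list[str]) -> set[str]:
--     expanded = set()
--
--     for interest in interests or []: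
--         key = interest.lower()
--         expanded.add(key)
--
--         for canonical, variants in CANONICAL_TOPICS.items():
--             if key == canonical or key in variants:
--                 expanded.add(canonical)
--                 expanded.update(variants)
--
--     return expanded
-- ===== SOURCE B (Python) =====
-- CANONICAL_TOPICS = {
--     "ai": ["ai", "artificial intelligence", "llm", "llms", "chatgpt"],
--     "mlops": ["mlops", "devops", "cloud", "infrastructure"],
--     "startup": ["startup", "startups", "business", "founder", "saas"],
--     "product": ["product", "pm", "ux", "design"],
--     "vc": ["vc", "investment", "funding"],
--     "general": [],
-- }
--
-- _INDEX = {}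
-- for _canonical, _variants in CANONICAL_TOPICS.items():
--     _group = (_canonical, _variants)
--     _INDEX[_canonical] = _group
--     for _v in _variants:
--         _INDEX[_v] = _group
--
-- def expand_interests(interests: list[str]) -> set[str]:
--     expanded = set()
--     for interest in interests or []:
--         key = interest.lower()
--         expanded.add(key)
--         group = _INDEX.get(key)
--         if group is not None:
--             canonical, variants = group
--             expanded.add(canonical)
--             expanded.update(variants)
--     return expanded
-- ===== Notes on version B (the rewrite author's own statement) =====
-- stated objective: faster
-- what changed: Replaces A's per-interest inner scan over all CANONICAL_TOPICS groups with a single lookup in a precomputed inverted index (variant/canonical -> group), removing the inner loop entirely.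
import Mathlib
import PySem

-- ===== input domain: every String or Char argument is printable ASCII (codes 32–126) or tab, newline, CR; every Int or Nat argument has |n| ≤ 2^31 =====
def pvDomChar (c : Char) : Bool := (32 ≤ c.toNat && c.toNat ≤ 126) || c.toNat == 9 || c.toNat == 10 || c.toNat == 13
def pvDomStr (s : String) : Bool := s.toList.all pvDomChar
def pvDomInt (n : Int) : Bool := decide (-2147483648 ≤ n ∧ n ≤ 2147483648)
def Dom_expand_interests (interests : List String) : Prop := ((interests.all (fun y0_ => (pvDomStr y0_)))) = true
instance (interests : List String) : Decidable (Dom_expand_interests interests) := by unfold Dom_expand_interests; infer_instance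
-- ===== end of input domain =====

-- B replaces A's per-interest scan over all topic groups by one lookup in a
-- precomputed inverted index (variant/canonical → group); return value compared
-- as a Python set (insertion-ordered distinct-element list here).

-- ===== PORT A =====
-- CANONICAL_TOPICS as an insertion-ordered association list
def pvTopics : List (String × List String) :=
  [("ai", ["ai", "artificial intelligence", "llm", "llms", "chatgpt"]),
   ("mlops", ["mlops", "devops", "cloud", "infrastructure"]),
   ("startup", ["startup", "startups", "business", "founder", "saas"]),
   ("product", ["product", "pm", "ux", "design"]),
   ("vc", ["vc", "investment", "funding"]),
   ("general", [])]

def expand_interests (interests : List String) : List String :=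
  interests.foldl (fun expanded interest =>
    let key := PySem.Str.lower interest
    let expanded := PySem.Set.add expanded key
    pvTopics.foldl (fun e p =>
      if key == p.1 || p.2.contains key then
        PySem.Set.update (PySem.Set.add e p.1) p.2
      else e) expanded) []

-- ===== PORT B =====
-- the inverted index _INDEX of Source B, built exactly as there
def pvIndex : PySem.Dict String (String × List String) :=
  pvTopics.foldl (fun d p =>
    p.2.foldl (fun d' v => d'.insert v p) (d.insert p.1 p))
    (PySem.Dict.empty : PySem.Dict String (String × List String))

def expand_interests_alt (interests : List String) : List String :=
  interests.foldl (fun expanded interest =>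
    let key := PySem.Str.lower interest
    let expanded := PySem.Set.add expanded key
    match PySem.Dict.get? pvIndex key with
    | some g => PySem.Set.update (PySem.Set.add expanded g.1) g.2
    | none => expanded) []

-- ===== PRECONDITION & SPEC =====
def Spec_expand_interests (interests : List String) (out : List String) : Prop := out = expand_interests_alt interests
instance (interests : List String) (out : List String) : Decidable (Spec_expand_interests interests out) := by unfold Spec_expand_interests; infer_instance

-- ===== CLAIM (what is proved, stated in full; the proofs are below) =====
def Claim_equal_expand_interests : Prop := ∀ (interests : List String), Dom_expand_interests interests → Spec_expand_interests interests (expand_interests interests)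

-- ===== LEMMAS AND PROOFS =====

-- pvIndex, evaluated to its literal association list
lemma pv_index_eq : pvIndex = PySem.Dict.mk
    [("ai", ("ai", ["ai", "artificial intelligence", "llm", "llms", "chatgpt"])),
     ("artificial intelligence", ("ai", ["ai", "artificial intelligence", "llm", "llms", "chatgpt"])),
     ("llm", ("ai", ["ai", "artificial intelligence", "llm", "llms", "chatgpt"])),
     ("llms", ("ai", ["ai", "artificial intelligence", "llm", "llms", "chatgpt"])),
     ("chatgpt", ("ai", ["ai", "artificial intelligence", "llm", "llms", "chatgpt"])),
     ("mlops", ("mlops", ["mlops", "devops", "cloud", "infrastructure"])),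
     ("devops", ("mlops", ["mlops", "devops", "cloud", "infrastructure"])),
     ("cloud", ("mlops", ["mlops", "devops", "cloud", "infrastructure"])),
     ("infrastructure", ("mlops", ["mlops", "devops", "cloud", "infrastructure"])),
     ("startup", ("startup", ["startup", "startups", "business", "founder", "saas"])),
     ("startups", ("startup", ["startup", "startups", "business", "founder", "saas"])),
     ("business", ("startup", ["startup", "startups", "business", "founder", "saas"])),
     ("founder", ("startup", ["startup", "startups", "business", "founder", "saas"])),
     ("saas", ("startup", ["startup", "startups", "business", "founder", "saas"])),
     ("product", ("product", ["product", "pm", "ux", "design"])),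
     ("pm", ("product", ["product", "pm", "ux", "design"])),
     ("ux", ("product", ["product", "pm", "ux", "design"])),
     ("design", ("product", ["product", "pm", "ux", "design"])),
     ("vc", ("vc", ["vc", "investment", "funding"])),
     ("investment", ("vc", ["vc", "investment", "funding"])),
     ("funding", ("vc", ["vc", "investment", "funding"])),
     ("general", ("general", []))] := by rfl

-- the per-interest step: scanning all topic groups equals one index lookup
set_option maxRecDepth 8192 in
lemma pv_step_eq (s : List String) (key : String) :
    pvTopics.foldl (fun e p =>
      if key == p.1 || p.2.contains key then
        PySem.Set.update (PySem.Set.add e p.1) p.2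
      else e) s
    = match PySem.Dict.get? pvIndex key with
      | some g => PySem.Set.update (PySem.Set.add s g.1) g.2
      | none => s := by
  rw [pv_index_eq]
  by_cases h : key ∈ ["ai", "artificial intelligence", "llm", "llms", "chatgpt",
    "mlops", "devops", "cloud", "infrastructure",
    "startup", "startups", "business", "founder", "saas",
    "product", "pm", "ux", "design",
    "vc", "investment", "funding", "general"]
  · simp only [List.mem_cons, List.not_mem_nil, or_false] at h
    rcases h with rfl|rfl|rfl|rfl|rfl|rfl|rfl|rfl|rfl|rfl|rfl|rfl|rfl|rfl|rfl|rfl|rfl|rfl|rfl|rfl|rfl|rfl <;>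
      simp [pvTopics, PySem.Set.update, PySem.Dict.get?]
  · simp only [List.mem_cons, List.not_mem_nil, or_false, not_or] at h
    obtain ⟨h1,h2,h3,h4,h5,h6,h7,h8,h9,h10,h11,h12,h13,h14,h15,h16,h17,h18,h19,h20,h21,h22⟩ := h
    simp only [PySem.Dict.get?_mk_cons, beq_iff_eq, Ne.symm h1, Ne.symm h2, Ne.symm h3,
      Ne.symm h4, Ne.symm h5, Ne.symm h6, Ne.symm h7, Ne.symm h8, Ne.symm h9, Ne.symm h10,
      Ne.symm h11, Ne.symm h12, Ne.symm h13, Ne.symm h14, Ne.symm h15, Ne.symm h16, Ne.symm h17,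
      Ne.symm h18, Ne.symm h19, Ne.symm h20, Ne.symm h21, Ne.symm h22, if_false]
    simp [pvTopics, PySem.Dict.get?,
      h1,h2,h3,h4,h5,h6,h7,h8,h9,h10,h11,h12,h13,h14,h15,h16,h17,h18,h19,h20,h21,h22]

theorem pv_spec_aux (interests : List String) (s : List String) :
    interests.foldl (fun expanded interest =>
      let key := PySem.Str.lower interest
      let expanded := PySem.Set.add expanded key
      pvTopics.foldl (fun e p =>
        if key == p.1 || p.2.contains key then
          PySem.Set.update (PySem.Set.add e p.1) p.2
        else e) expanded) s
    = interests.foldl (fun expanded interest =>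
      let key := PySem.Str.lower interest
      let expanded := PySem.Set.add expanded key
      match PySem.Dict.get? pvIndex key with
      | some g => PySem.Set.update (PySem.Set.add expanded g.1) g.2
      | none => expanded) s := by
  simp only [pv_step_eq]

-- ===== VERDICT (by name: the statement is the Claim_ definition above) =====
theorem expand_interests_spec : Claim_equal_expand_interests := by
  intro interests _
  unfold Spec_expand_interests expand_interests expand_interests_alt
  exact pv_spec_aux interests []
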